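-- pv_equiv track=rewrite | github.com/yeonddori/Algorithm-Study | tbvjgjfzm/2024-04/PGS_LV0_공-던지기.py | solution
-- ===== SOURCE A (Python) =====
-- def solution(numbers, k):
--     answer = 0
--     i=0
--     for j in range (1, k + 1, 1):
--         if i < len(numbers):
--             answer = numbers[i]
--             i += 2
--         else:
--             answer = numbers[i%len(numbers)]
--             i += 2
--     return answer
-- ===== SOURCE B (Python) =====
-- def solution(numbers, k):
--     if k < 1:
--         return 0
--     return numbers[(2 * (k - 1)) % len(numbers)]
-- ===== Notes on version B (the rewrite author's own statement) =====
-- stated objective: faster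
-- what changed: Replaces A's O(k) simulation loop over range(1, k+1) by the closed-form index (2*(k-1)) % len(numbers), returning 0 directly when k < 1 (no throws).
import Mathlib
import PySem

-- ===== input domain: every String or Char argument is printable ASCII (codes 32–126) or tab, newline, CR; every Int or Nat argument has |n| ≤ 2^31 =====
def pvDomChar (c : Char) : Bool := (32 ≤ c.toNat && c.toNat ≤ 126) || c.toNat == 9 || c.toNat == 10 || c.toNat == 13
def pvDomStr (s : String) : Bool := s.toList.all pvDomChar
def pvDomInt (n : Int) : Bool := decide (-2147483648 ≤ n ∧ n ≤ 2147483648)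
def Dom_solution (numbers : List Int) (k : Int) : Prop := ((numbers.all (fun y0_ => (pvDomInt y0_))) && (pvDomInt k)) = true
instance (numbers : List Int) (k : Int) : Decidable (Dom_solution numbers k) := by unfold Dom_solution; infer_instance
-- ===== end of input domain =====

-- B replaces A's O(k) simulation loop by the closed-form index (2*(k-1)) % len(numbers): asymptotically faster.

-- ===== PORT A =====
-- the loop body: state (answer, i); pyGetD is exact here since Pre_ guarantees the index is in range
def solutionStep (numbers : List Int) (s : Int × Int) (_j : Int) : Int × Int :=
  if s.2 < (numbers.length : Int) then
    (PySem.List.pyGetD numbers s.2 0, s.2 + 2)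
  else
    (PySem.List.pyGetD numbers (PySem.Int.mod s.2 (numbers.length : Int)) 0, s.2 + 2)

def solution (numbers : List Int) (k : Int) : Int :=
  ((PySem.List.pyRange 1 (k + 1) 1).foldl (solutionStep numbers) (0, 0)).1

-- ===== PORT B =====
def solution_alt (numbers : List Int) (k : Int) : Int :=
  if k < 1 then 0
  else PySem.List.pyGetD numbers (PySem.Int.mod (2 * (k - 1)) (numbers.length : Int)) 0

-- ===== PRECONDITION & SPEC =====
-- Pre_ excludes only the inputs where A raises ZeroDivisionError: numbers empty while k ≥ 1.
def Pre_solution (numbers : List Int) (k : Int) : Prop := numbers = [] → k < 1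
instance (numbers : List Int) (k : Int) : Decidable (Pre_solution numbers k) := by unfold Pre_solution; infer_instance

def pvWitness_solution : List Int × Int := ([3, 1, 4], 5)

def Spec_solution (numbers : List Int) (k : Int) (out : Int) : Prop := out = solution_alt numbers k
instance (numbers : List Int) (k : Int) (out : Int) : Decidable (Spec_solution numbers k out) := by unfold Spec_solution; infer_instance

-- ===== CLAIM (what is proved, stated in full; the proofs are below) =====
def Claim_equal_solution : Prop := ∀ (numbers : List Int) (k : Int), Dom_solution numbers k → Pre_solution numbers k → Spec_solution numbers k (solution numbers k)

-- ===== LEMMAS AND PROOFS =====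

-- the second state component advances by 2 per iteration, independent of the elements
theorem solution_snd (numbers : List Int) (l : List Int) (s : Int × Int) :
    (l.foldl (solutionStep numbers) s).2 = s.2 + 2 * l.length := by
  induction l generalizing s with
  | nil => simp
  | cons x xs ih =>
      simp only [List.foldl_cons, ih]
      unfold solutionStep
      split_ifs <;> (simp only [List.length_cons]; push_cast; omega)

theorem solution_fst (numbers : List Int) (k : Int) (hne : numbers ≠ []) (hk : 1 ≤ k) :
    solution numbers k
      = PySem.List.pyGetD numbers (PySem.Int.mod (2 * (k - 1)) (numbers.length : Int)) 0 := by
  have hlen : 0 < (numbers.length : Int) := by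
    have h1 : 0 < numbers.length := List.length_pos_iff.mpr hne
    omega
  unfold solution
  rw [PySem.List.pyRange_one_succ_right hk, List.foldl_append]
  have hsnd : ((PySem.List.pyRange 1 k 1).foldl (solutionStep numbers) (0, 0)).2 = 2 * (k - 1) := by
    rw [solution_snd, PySem.List.length_pyRange_one]
    omega
  simp only [List.foldl_cons, List.foldl_nil]
  set st := List.foldl (solutionStep numbers) (0, 0) (PySem.List.pyRange 1 k 1) with hst
  unfold solutionStep
  rw [hsnd]
  split_ifs with h
  · -- direct index: 2*(k-1) < len, so it equals its own mod
    have hmod : PySem.Int.mod (2 * (k - 1)) (numbers.length : Int) = 2 * (k - 1) := by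
      rw [PySem.Int.mod_eq_emod_of_pos hlen, Int.emod_eq_of_lt (by omega) h]
    rw [hmod]
  · rfl

-- ===== VERDICT (by name: the statement is the Claim_ definition above) =====
theorem solution_spec : Claim_equal_solution := by
  intro numbers k _hdom hpre
  unfold Spec_solution solution_alt
  by_cases hk : k < 1
  · -- empty loop on both sides
    simp only [hk, if_true]
    unfold solution
    rw [PySem.List.pyRange_one_eq_nil (by omega : k + 1 ≤ 1)]
    rfl
  · have hne : numbers ≠ [] := by
      intro h; exact hk (hpre h)
    simp only [hk, if_false]
    exact solution_fst numbers k hne (by omega)
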